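-- pv_equiv track=rewrite | github.com/ShazShoaib/Image-Upscale | Upscale.py | interpolate_cols
-- ===== SOURCE A (Python) =====
-- from math import floor
--
-- def interpolate_cols(pixels2D):
--     interpolated = []
--     for i in range(len(pixels2D)-1,-1,-1):
--         interpolated_col = []
--         for j in range(len(pixels2D[0])-1,-1,-1):
--             interpolated_col.insert(0, pixels2D[i][j])
--             rgb = floor((pixels2D[i][j-1][0] + pixels2D[i][j][0])/2),floor((pixels2D[i][j-1][1] + pixels2D[i][j][1])/2),floor((pixels2D[i][j-1][2] + pixels2D[i][j][2])/2)
--             interpolated_col.insert(0,rgb)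
--         del interpolated_col[0]
--         interpolated.insert(0,interpolated_col)
--
--     return interpolated
-- ===== SOURCE B (Python) =====
-- def interpolate_cols(pixels2D):
--     if not pixels2D:
--         return []
--     n = len(pixels2D[0])
--     out = []
--     for row in pixels2D:
--         mids = [((row[j - 1][0] + row[j][0]) // 2,
--                  (row[j - 1][1] + row[j][1]) // 2,
--                  (row[j - 1][2] + row[j][2]) // 2)
--                 for j in range(1, n)]
--         new_row = [row[0]]
--         for k in range(1, n):
--             new_row.append(mids[k - 1])
--             new_row.append(row[k])
--         out.append(new_row)
--     return out
-- ===== Notes on version B (the rewrite author's own statement) =====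
-- stated objective: simpler
-- what changed: B replaces A's backwards double loop with insert(0,...) and a trailing del by a forward per-row pass that precomputes the table of column midpoints and then interleaves originals with midpoints by appending, using integer // 2 instead of floor of float division.
import Mathlib
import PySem

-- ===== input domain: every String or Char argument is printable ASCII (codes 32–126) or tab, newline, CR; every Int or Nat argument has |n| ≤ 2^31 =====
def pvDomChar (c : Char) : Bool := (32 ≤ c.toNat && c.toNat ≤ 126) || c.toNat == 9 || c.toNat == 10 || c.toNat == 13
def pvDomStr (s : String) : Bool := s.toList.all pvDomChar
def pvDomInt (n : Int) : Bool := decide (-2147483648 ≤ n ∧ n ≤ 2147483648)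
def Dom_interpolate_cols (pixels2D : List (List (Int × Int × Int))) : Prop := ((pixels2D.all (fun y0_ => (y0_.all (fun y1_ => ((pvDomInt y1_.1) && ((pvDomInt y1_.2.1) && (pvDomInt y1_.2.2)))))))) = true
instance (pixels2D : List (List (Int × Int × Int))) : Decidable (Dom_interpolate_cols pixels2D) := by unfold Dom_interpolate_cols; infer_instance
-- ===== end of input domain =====

-- B replaces A's backwards insert(0)/del loops by a forward per-row pass: a midpoint table then interleaving by append.


-- ===== PORT A =====
-- floor((a+b)/2) in Python is float division then floor; with |a|,|b| ≤ 2^31 (Dom) the float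
-- arithmetic is exact, so it equals integer floor division — ported as PySem.Int.floordiv.
def interpolate_cols (pixels2D : List (List (Int × Int × Int))) : List (List (Int × Int × Int)) :=
  (PySem.List.pyRange ((pixels2D.length : Int) - 1) (-1) (-1)).foldl
    (fun interpolated i =>
      let row := PySem.List.pyGetD pixels2D i []
      let icol :=
        (PySem.List.pyRange (((pixels2D.headD []).length : Int) - 1) (-1) (-1)).foldl
          (fun col j =>
            -- interpolated_col.insert(0, pixels2D[i][j]); then insert(0, rgb)
            let p := PySem.List.pyGetD row j (0, 0, 0)
            let q := PySem.List.pyGetD row (j - 1) (0, 0, 0)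
            let rgb := (PySem.Int.floordiv (q.1 + p.1) 2,
                        PySem.Int.floordiv (q.2.1 + p.2.1) 2,
                        PySem.Int.floordiv (q.2.2 + p.2.2) 2)
            rgb :: p :: col)
          []
      -- del interpolated_col[0]  (raises on an empty row: excluded by Pre_); interpolated.insert(0, icol)
      icol.tail :: interpolated)
    []

-- ===== PORT B =====
def interpolate_cols_alt (pixels2D : List (List (Int × Int × Int))) : List (List (Int × Int × Int)) :=
  match pixels2D with
  | [] => []
  | r0 :: _ =>
    let n := (r0.length : Int)
    pixels2D.map (fun row =>
      let mids := (PySem.List.pyRange 1 n 1).map (fun j =>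
        let a := PySem.List.pyGetD row (j - 1) (0, 0, 0)
        let b := PySem.List.pyGetD row j (0, 0, 0)
        (PySem.Int.floordiv (a.1 + b.1) 2,
         PySem.Int.floordiv (a.2.1 + b.2.1) 2,
         PySem.Int.floordiv (a.2.2 + b.2.2) 2))
      (PySem.List.pyRange 1 n 1).foldl
        (fun acc k => acc ++ [PySem.List.pyGetD mids (k - 1) (0, 0, 0),
                              PySem.List.pyGetD row k (0, 0, 0)])
        [PySem.List.pyGetD row 0 (0, 0, 0)])

-- ===== PRECONDITION & SPEC =====
-- Pre_ excludes exactly the inputs on which the Python A raises IndexError: a nonempty image whose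
-- first row is empty (del interpolated_col[0] on []) or that contains a row shorter than the first
-- row (pixels2D[i][j] out of range).  B raises IndexError on those inputs too.
def Pre_interpolate_cols (pixels2D : List (List (Int × Int × Int))) : Prop :=
  pixels2D = [] ∨
    (0 < (pixels2D.headD []).length ∧
     ∀ row ∈ pixels2D, (pixels2D.headD []).length ≤ row.length)
instance (pixels2D : List (List (Int × Int × Int))) : Decidable (Pre_interpolate_cols pixels2D) := by
  unfold Pre_interpolate_cols; infer_instance
def pvWitness_interpolate_cols : (List (List (Int × Int × Int))) :=
  [[(1, 2, 3), (5, 6, 7)], [(0, 0, 0), (2, 4, 9)]]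
def Spec_interpolate_cols (pixels2D : List (List (Int × Int × Int))) (out : List (List (Int × Int × Int))) : Prop := out = interpolate_cols_alt pixels2D
instance (pixels2D : List (List (Int × Int × Int))) (out : List (List (Int × Int × Int))) : Decidable (Spec_interpolate_cols pixels2D out) := by unfold Spec_interpolate_cols; infer_instance

-- ===== CLAIM (what is proved, stated in full; the proofs are below) =====
def Claim_equal_interpolate_cols : Prop := ∀ (pixels2D : List (List (Int × Int × Int))), Dom_interpolate_cols pixels2D → Pre_interpolate_cols pixels2D → Spec_interpolate_cols pixels2D (interpolate_cols pixels2D)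

-- ===== LEMMAS AND PROOFS =====

-- the midpoint of two pixels, and the interpolated form of one row (the common normal form)
def pvAvg (a b : Int × Int × Int) : Int × Int × Int :=
  (PySem.Int.floordiv (a.1 + b.1) 2,
   PySem.Int.floordiv (a.2.1 + b.2.1) 2,
   PySem.Int.floordiv (a.2.2 + b.2.2) 2)

def pvRow (n : Int) (row : List (Int × Int × Int)) : List (Int × Int × Int) :=
  PySem.List.pyGetD row 0 (0, 0, 0) ::
    (PySem.List.pyRange 1 n 1).flatMap (fun j =>
      [pvAvg (PySem.List.pyGetD row (j - 1) (0, 0, 0)) (PySem.List.pyGetD row j (0, 0, 0)),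
       PySem.List.pyGetD row j (0, 0, 0)])

lemma pv_foldl_cons1 {α β : Type} (f : β → α) :
    ∀ (l : List β) (init : List α),
      l.foldl (fun acc i => f i :: acc) init = l.reverse.map f ++ init := by
  intro l
  induction l with
  | nil => simp
  | cons a l ih => intro init; simp [ih]

lemma pv_foldl_cons2 {α β : Type} (f g : β → α) :
    ∀ (l : List β) (init : List α),
      l.foldl (fun acc i => f i :: g i :: acc) init
        = l.reverse.flatMap (fun i => [f i, g i]) ++ init := by
  intro l
  induction l with
  | nil => simp
  | cons a l ih => intro init; simp [ih]

-- A's inner loop (one column of the output), named so the outer loop can be folded over it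
def pvColA (pixels2D : List (List (Int × Int × Int))) (i : Int) : List (Int × Int × Int) :=
  ((PySem.List.pyRange (((pixels2D.headD []).length : Int) - 1) (-1) (-1)).foldl
    (fun col j =>
      let p := PySem.List.pyGetD (PySem.List.pyGetD pixels2D i []) j (0, 0, 0)
      let q := PySem.List.pyGetD (PySem.List.pyGetD pixels2D i []) (j - 1) (0, 0, 0)
      let rgb := (PySem.Int.floordiv (q.1 + p.1) 2,
                  PySem.Int.floordiv (q.2.1 + p.2.1) 2,
                  PySem.Int.floordiv (q.2.2 + p.2.2) 2)
      rgb :: p :: col)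
    []).tail

lemma pvColA_eq (pixels2D : List (List (Int × Int × Int))) (i : Int)
    (hn : 0 < (pixels2D.headD []).length) :
    pvColA pixels2D i
      = pvRow ((pixels2D.headD []).length : Int) (PySem.List.pyGetD pixels2D i []) := by
  unfold pvColA
  rw [show (fun (col : List (Int × Int × Int)) (j : Int) =>
        let p := PySem.List.pyGetD (PySem.List.pyGetD pixels2D i []) j (0, 0, 0)
        let q := PySem.List.pyGetD (PySem.List.pyGetD pixels2D i []) (j - 1) (0, 0, 0)
        let rgb := (PySem.Int.floordiv (q.1 + p.1) 2,
                    PySem.Int.floordiv (q.2.1 + p.2.1) 2,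
                    PySem.Int.floordiv (q.2.2 + p.2.2) 2)
        rgb :: p :: col)
      = (fun col j =>
          pvAvg (PySem.List.pyGetD (PySem.List.pyGetD pixels2D i []) (j - 1) (0, 0, 0))
                (PySem.List.pyGetD (PySem.List.pyGetD pixels2D i []) j (0, 0, 0))
            :: PySem.List.pyGetD (PySem.List.pyGetD pixels2D i []) j (0, 0, 0) :: col) from rfl]
  rw [pv_foldl_cons2]
  rw [PySem.List.pyRange_neg_one_eq_reverse]
  rw [show ((-1 : Int) + 1) = 0 from rfl,
      show (((pixels2D.headD []).length : Int) - 1 + 1) = ((pixels2D.headD []).length : Int) by ring]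
  rw [List.reverse_reverse]
  rw [PySem.List.pyRange_one_cons (by exact_mod_cast hn)]
  simp [pvRow]

lemma pvRowB_eq (n : Int) (row : List (Int × Int × Int)) :
    (let mids := (PySem.List.pyRange 1 n 1).map (fun j =>
        let a := PySem.List.pyGetD row (j - 1) (0, 0, 0)
        let b := PySem.List.pyGetD row j (0, 0, 0)
        (PySem.Int.floordiv (a.1 + b.1) 2,
         PySem.Int.floordiv (a.2.1 + b.2.1) 2,
         PySem.Int.floordiv (a.2.2 + b.2.2) 2))
     (PySem.List.pyRange 1 n 1).foldl
        (fun acc k => acc ++ [PySem.List.pyGetD mids (k - 1) (0, 0, 0),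
                              PySem.List.pyGetD row k (0, 0, 0)])
        [PySem.List.pyGetD row 0 (0, 0, 0)])
    = pvRow n row := by
  show (PySem.List.pyRange 1 n 1).foldl _ _ = _
  trans ((PySem.List.pyRange 1 n 1).foldl
      (fun acc k => acc ++ [pvAvg (PySem.List.pyGetD row (k - 1) (0, 0, 0))
                                  (PySem.List.pyGetD row k (0, 0, 0)),
                            PySem.List.pyGetD row k (0, 0, 0)])
      [PySem.List.pyGetD row 0 (0, 0, 0)])
  · refine PySem.List.foldl_congr_mem _ _ _ _ ?_
    intro acc k hk
    rw [PySem.List.mem_pyRange_one] at hk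
    rw [PySem.List.pyGetD_eq_getElem _ _ (by omega)
        (by simp [PySem.List.length_pyRange_one]; omega)]
    simp only [List.getElem_map, PySem.List.getElem_pyRange_one]
    rw [show (1 : Int) + ((k - 1).toNat : Int) = k by omega]
    rfl
  · rw [PySem.List.foldl_append_eq_flatMap
        (fun k => [pvAvg (PySem.List.pyGetD row (k - 1) (0, 0, 0))
                         (PySem.List.pyGetD row k (0, 0, 0)),
                   PySem.List.pyGetD row k (0, 0, 0)])]
    simp [pvRow]

-- ===== VERDICT (by name: the statement is the Claim_ definition above) =====
theorem interpolate_cols_spec : Claim_equal_interpolate_cols := by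
  intro pixels2D _hdom hpre
  unfold Spec_interpolate_cols
  cases pixels2D with
  | nil => rfl
  | cons r0 rest =>
    rcases hpre with h | ⟨hn, _hlen⟩
    · exact absurd h (by simp)
    have hn' : 0 < r0.length := by simpa using hn
    -- A-side: fold to a map of pvRow over the rows
    have hA : interpolate_cols (r0 :: rest)
        = (r0 :: rest).map (pvRow ((r0.length : Nat) : Int)) := by
      have h1 : interpolate_cols (r0 :: rest)
          = (PySem.List.pyRange (((r0 :: rest).length : Int) - 1) (-1) (-1)).foldl
              (fun acc i => pvColA (r0 :: rest) i :: acc) [] := rfl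
      rw [h1, pv_foldl_cons1, PySem.List.pyRange_neg_one_eq_reverse]
      rw [show ((-1 : Int) + 1) = 0 from rfl,
          show ((((r0 :: rest).length : Nat) : Int) - 1 + 1) = (((r0 :: rest).length : Nat) : Int) by ring]
      rw [List.reverse_reverse, List.append_nil]
      have h2 : ∀ i : Int, pvColA (r0 :: rest) i
          = pvRow ((r0.length : Nat) : Int) (PySem.List.pyGetD (r0 :: rest) i []) := by
        intro i
        simpa using pvColA_eq (r0 :: rest) i (by simpa using hn')
      calc (PySem.List.pyRange 0 (((r0 :: rest).length : Nat) : Int) 1).map (pvColA (r0 :: rest))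
          = (PySem.List.pyRange 0 (((r0 :: rest).length : Nat) : Int) 1).map
              (fun i => pvRow ((r0.length : Nat) : Int) (PySem.List.pyGetD (r0 :: rest) i [])) := by
            exact List.map_congr_left (fun i _ => h2 i)
        _ = ((PySem.List.pyRange 0 (((r0 :: rest).length : Nat) : Int) 1).map
              (fun i => PySem.List.pyGetD (r0 :: rest) i [])).map
              (pvRow ((r0.length : Nat) : Int)) := by
            rw [List.map_map]; rfl
        _ = (r0 :: rest).map (pvRow ((r0.length : Nat) : Int)) := by
            rw [PySem.List.map_pyGetD_pyRange_zero']
    -- B-side: each row's loop equals pvRow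
    have hB : interpolate_cols_alt (r0 :: rest)
        = (r0 :: rest).map (pvRow ((r0.length : Nat) : Int)) := by
      simp only [interpolate_cols_alt]
      refine List.map_congr_left (fun row _ => ?_)
      exact pvRowB_eq ((r0.length : Nat) : Int) row
    rw [hA, hB]
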